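-- pv_equiv track=rewrite | github.com/619cip/CSCI1133 | exercises/ex11-5.py | min_es
-- ===== SOURCE A (Python) =====
-- def count_es(string):
--     if not string:
--         return 0
--     if string[0] != 'e':
--         return count_es(string[1:])
--     return 1 + count_es(string[1:])
--
-- def min_es(string_list):
--     if not string_list:
--         return
--
--     cur_str = string_list[0]
--     next_str = min_es(string_list[1:])
--     if count_es(cur_str) < count_es(next_str) or not next_str:
--         return cur_str
--     return next_str
-- ===== SOURCE B (Python) =====
-- # Iterative reverse scan with an accumulator that also carries the best's e-count (replaces A's double recursion).
-- def min_es(string_list):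
--     best, best_count = None, 0
--     for s in reversed(string_list):
--         n = sum(c == 'e' for c in s)
--         if not best or n < best_count:
--             best, best_count = s, n
--     return best
-- ===== Notes on version B (the rewrite author's own statement) =====
-- stated objective: faster
-- what changed: Replaces the double recursion (recursive min over the tail with list slicing, plus a character-by-character recursive e-counter slicing the string) with a single iterative reverse scan that keeps the running best together with its e-count; each string is counted once and nothing is sliced.
import Mathlib
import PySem

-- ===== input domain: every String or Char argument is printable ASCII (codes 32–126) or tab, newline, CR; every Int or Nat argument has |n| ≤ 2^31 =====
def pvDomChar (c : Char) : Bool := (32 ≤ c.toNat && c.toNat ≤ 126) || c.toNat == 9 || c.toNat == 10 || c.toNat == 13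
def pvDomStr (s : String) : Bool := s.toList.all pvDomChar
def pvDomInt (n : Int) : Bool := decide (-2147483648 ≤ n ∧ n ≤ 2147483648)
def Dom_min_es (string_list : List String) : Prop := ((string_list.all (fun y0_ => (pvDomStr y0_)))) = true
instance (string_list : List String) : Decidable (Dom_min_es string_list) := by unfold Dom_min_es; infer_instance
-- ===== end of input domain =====

-- B replaces A's double recursion with one iterative reverse scan; equal return value on every input.

-- ===== PORT A =====
-- count_es on the characters of a string (A recurses on string[1:])
def count_es_chars : List Char → Int
  | [] => 0
  | c :: rest => if c ≠ 'e' then count_es_chars rest else 1 + count_es_chars rest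

-- A passes both a str and the None result of the recursive call to count_es; `not string` is true for None and ""
def count_es (string : Option String) : Int :=
  match string with
  | none => 0
  | some s => count_es_chars s.toList

def min_es : List String → Option String
  | [] => none
  | cur_str :: rest =>
    let next_str := min_es rest
    if count_es (some cur_str) < count_es next_str ∨ next_str = none ∨ next_str = some "" then
      some cur_str
    else
      next_str

-- ===== PORT B =====
-- Source B: n = sum(c == 'e' for c in s)
def e_sum (s : String) : Int :=
  (s.toList.map (fun c => if c = 'e' then (1 : Int) else 0)).sum

-- Source B: best, best_count = None, 0; for s in reversed(string_list): if not best or n < best_count: update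
def min_es_alt (string_list : List String) : Option String :=
  (string_list.reverse.foldl
    (fun (st : Option String × Int) s =>
      let n := e_sum s
      match st.1 with
      | none => (some s, n)
      | some b => if b = "" ∨ n < st.2 then (some s, n) else st)
    (none, 0)).1

-- ===== PRECONDITION & SPEC =====
def Spec_min_es (string_list : List String) (out : Option String) : Prop := out = min_es_alt string_list
instance (string_list : List String) (out : Option String) : Decidable (Spec_min_es string_list out) := by unfold Spec_min_es; infer_instance

-- ===== CLAIM (what is proved, stated in full; the proofs are below) =====
def Claim_equal_min_es : Prop := ∀ (string_list : List String), Dom_min_es string_list → Spec_min_es string_list (min_es string_list)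

-- ===== LEMMAS AND PROOFS =====

theorem e_sum_eq (s : String) : e_sum s = count_es_chars s.toList := by
  unfold e_sum
  induction s.toList with
  | nil => simp [count_es_chars]
  | cons c t ih =>
    by_cases h : c = 'e' <;> simp [count_es_chars, h, ih]

def pack : Option String → Option String × Int
  | none => (none, 0)
  | some b => (some b, e_sum b)

theorem fold_inv (l : List String) :
    l.reverse.foldl
      (fun (st : Option String × Int) s =>
        let n := e_sum s
        match st.1 with
        | none => (some s, n)
        | some b => if b = "" ∨ n < st.2 then (some s, n) else st)
      (none, 0) = pack (min_es l) := by
  induction l with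
  | nil => rfl
  | cons c t ih =>
    rw [List.reverse_cons, List.foldl_append, ih]
    cases hm : min_es t with
    | none => simp [min_es, hm, pack]
    | some b =>
      by_cases hb : b = ""
      · simp [min_es, hm, hb, pack, count_es]
      · by_cases hlt : e_sum c < e_sum b
        · have h2 : count_es_chars c.toList < count_es_chars b.toList := by
            simpa [e_sum_eq] using hlt
          simp [min_es, hm, hb, hlt, h2, pack, count_es]
        · have h2 : ¬ count_es_chars c.toList < count_es_chars b.toList := by
            simpa [e_sum_eq] using hlt
          simp [min_es, hm, hb, hlt, h2, pack, count_es]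

theorem min_es_alt_eq (l : List String) : min_es_alt l = min_es l := by
  unfold min_es_alt
  rw [fold_inv]
  cases min_es l <;> rfl

-- ===== VERDICT (by name: the statement is the Claim_ definition above) =====
theorem min_es_spec : Claim_equal_min_es := by
  intro l _
  unfold Spec_min_es
  exact (min_es_alt_eq l).symm
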